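-- pv_equiv track=rewrite | github.com/root35/python | py-02-exercises/hackerrank-datastructures-ds-challenge-5-arrays.py | arrayManipulation
-- ===== SOURCE A (Python) =====
-- def arrayManipulation(arr_size, queries):
--     if arr_size == 0:
--         return None
--
--     if (not queries) or (len(queries[0]) != 3):
--         return None
--
--     res = [0] * arr_size
--     for query in queries:
--         if (query[0] > arr_size) or (query[0] < 1) \
--            or (query[1] > arr_size) or (query[1] < 1):
--             continue
--         idx = list(range(query[0]-1, query[1]-1))
--         for i in idx:
--             res[i] += query[2]
--
--     return res
-- ===== SOURCE B (Python) =====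
-- def arrayManipulation(arr_size, queries):
--     if arr_size == 0:
--         return None
--     if (not queries) or (len(queries[0]) != 3):
--         return None
--
--     diff = [0] * (arr_size + 1) if arr_size > 0 else []
--     for q in queries:
--         a = q[0]
--         if a < 1 or a > arr_size:
--             continue
--         b = q[1]
--         if b < 1 or b > arr_size or a >= b:
--             continue
--         k = q[2]
--         diff[a - 1] += k
--         diff[b - 1] -= k
--
--     res = []
--     acc = 0
--     for i in range(arr_size):
--         acc += diff[i]
--         res.append(acc)
--     return res
-- ===== Notes on version B (the rewrite author's own statement) =====
-- stated objective: alternative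
-- what changed: Replaces A's per-query inner loop that adds the value at every index of the range with endpoint updates on a difference array plus one final prefix-sum pass (out-of-bounds or empty ranges, a >= b, are skipped as in A).
import Mathlib
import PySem

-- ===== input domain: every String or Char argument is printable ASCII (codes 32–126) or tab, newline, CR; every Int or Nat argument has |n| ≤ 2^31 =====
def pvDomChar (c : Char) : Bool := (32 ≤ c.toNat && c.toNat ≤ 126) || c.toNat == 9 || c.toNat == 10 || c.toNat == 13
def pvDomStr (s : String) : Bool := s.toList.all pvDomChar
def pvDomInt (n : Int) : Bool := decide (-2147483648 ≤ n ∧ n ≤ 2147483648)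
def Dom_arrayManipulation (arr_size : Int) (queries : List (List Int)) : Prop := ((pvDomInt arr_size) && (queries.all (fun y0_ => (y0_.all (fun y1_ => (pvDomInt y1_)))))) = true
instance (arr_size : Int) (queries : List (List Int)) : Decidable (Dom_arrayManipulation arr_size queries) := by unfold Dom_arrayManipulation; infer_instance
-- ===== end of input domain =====

-- B replaces A's per-query loop over every index of the range by endpoint updates on a
-- difference array plus one prefix-sum pass; return values agree wherever A returns.

-- ===== PORT A =====
-- body of A's `for query in queries:` loop (the guard, then `for i in idx: res[i] += query[2]`)
def pvStepA (arr_size : Int) (res query : List Int) : List Int :=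
  let a := query.getD 0 0
  if a > arr_size ∨ a < 1 ∨ query.getD 1 0 > arr_size ∨ query.getD 1 0 < 1 then res
  else
    (PySem.List.pyRange (a - 1) (query.getD 1 0 - 1) 1).foldl
      (fun r i => r.set i.toNat (r.getD i.toNat 0 + query.getD 2 0)) res

def arrayManipulation (arr_size : Int) (queries : List (List Int)) : Option (List Int) :=
  if arr_size = 0 then none
  else if queries = [] ∨ ((queries.headD []).length : Int) ≠ 3 then none
  else some (queries.foldl (pvStepA arr_size) (List.replicate arr_size.toNat 0))

-- ===== PORT B =====
-- body of B's query loop: two short-circuited guards, then the two endpoint updates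
def pvStepB (arr_size : Int) (d q : List Int) : List Int :=
  let a := q.getD 0 0
  if a < 1 ∨ a > arr_size then d
  else
    let b := q.getD 1 0
    if b < 1 ∨ b > arr_size ∨ a ≥ b then d
    else
      let k := q.getD 2 0
      let d1 := d.set (a - 1).toNat (d.getD (a - 1).toNat 0 + k)
      d1.set (b - 1).toNat (d1.getD (b - 1).toNat 0 - k)

def arrayManipulation_alt (arr_size : Int) (queries : List (List Int)) : Option (List Int) :=
  if arr_size = 0 then none
  else if queries = [] ∨ ((queries.headD []).length : Int) ≠ 3 then none
  else
    let diff := queries.foldl (pvStepB arr_size)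
      (if arr_size > 0 then List.replicate (arr_size + 1).toNat 0 else [])
    some ((List.range arr_size.toNat).foldl
      (fun p i => (p.1 ++ [p.2 + diff.getD i 0], p.2 + diff.getD i 0))
      (([] : List Int), (0 : Int))).1

-- ===== PRECONDITION & SPEC =====
-- Pre_ excludes exactly the inputs on which the Python A raises an IndexError (a query list too
-- short for the subscripts A actually evaluates); the Python B raises on those same inputs.
def Pre_arrayManipulation (arr_size : Int) (queries : List (List Int)) : Prop :=
  arr_size = 0 ∨ queries = [] ∨ ((queries.headD []).length : Int) ≠ 3 ∨
    ∀ q ∈ queries, 1 ≤ q.length ∧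
      (q.getD 0 0 > arr_size ∨ q.getD 0 0 < 1 ∨
        (2 ≤ q.length ∧ (q.getD 1 0 > arr_size ∨ q.getD 1 0 < 1 ∨
          q.getD 1 0 ≤ q.getD 0 0 ∨ 3 ≤ q.length)))
instance (arr_size : Int) (queries : List (List Int)) : Decidable (Pre_arrayManipulation arr_size queries) := by unfold Pre_arrayManipulation; infer_instance

def pvWitness_arrayManipulation : Int × List (List Int) := (5, [[1, 3, 10], [2, 5, 7]])

def Spec_arrayManipulation (arr_size : Int) (queries : List (List Int)) (out : Option (List Int)) : Prop := out = arrayManipulation_alt arr_size queries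
instance (arr_size : Int) (queries : List (List Int)) (out : Option (List Int)) : Decidable (Spec_arrayManipulation arr_size queries out) := by unfold Spec_arrayManipulation; infer_instance

-- ===== CLAIM (what is proved, stated in full; the proofs are below) =====
def Claim_equal_arrayManipulation : Prop := ∀ (arr_size : Int) (queries : List (List Int)), Dom_arrayManipulation arr_size queries → Pre_arrayManipulation arr_size queries → Spec_arrayManipulation arr_size queries (arrayManipulation arr_size queries)

-- ===== LEMMAS AND PROOFS =====

-- sum of the first m entries of d, getD-based (total)
def pvS (d : List Int) (m : Nat) : Int := ((List.range m).map (fun i => d.getD i 0)).sum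

theorem pvS_succ (d : List Int) (m : Nat) : pvS d (m + 1) = pvS d m + d.getD m 0 := by
  simp [pvS, List.range_succ]

theorem pv_getD_set (d : List Int) (p i : Nat) (v : Int) :
    (d.set p v).getD i 0 = if p = i ∧ p < d.length then v else d.getD i 0 := by
  simp [List.getD_eq_getElem?_getD, List.getElem?_set]
  split_ifs with h1 h2 h3 <;> simp_all <;> omega

theorem pvS_set (d : List Int) (p : Nat) (v : Int) (hp : p < d.length) (m : Nat) :
    pvS (d.set p v) m = pvS d m + (if p < m then v - d.getD p 0 else 0) := by
  induction m with
  | zero => simp [pvS]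
  | succ m ih =>
    rw [pvS_succ, pvS_succ, ih, pv_getD_set]
    by_cases hpm : p = m
    · subst hpm; simp [hp]
    · have h2 : ¬ (p = m ∧ p < d.length) := by tauto
      rw [if_neg h2]
      split_ifs <;> omega

-- A's inner loop preserves the length of res
theorem pv_addRange_length (k : Int) (l : List Int) (r : List Int) :
    (l.foldl (fun r i => r.set i.toNat (r.getD i.toNat 0 + k)) r).length = r.length := by
  induction l generalizing r with
  | nil => rfl
  | cons x xs ih => rw [List.foldl_cons, ih]; simp

-- value of A's inner loop: it adds k at every index in [s, t)
theorem pv_addRange_getD (k : Int) :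
    ∀ (m : Nat) (s t : Int), (t - s).toNat = m → 0 ≤ s → ∀ (r : List Int) (j : Nat),
    ((PySem.List.pyRange s t 1).foldl (fun r i => r.set i.toNat (r.getD i.toNat 0 + k)) r).getD j 0
      = r.getD j 0 + (if s ≤ (j : Int) ∧ (j : Int) < t ∧ j < r.length then k else 0) := by
  intro m
  induction m with
  | zero =>
    intro s t hm hs r j
    rw [PySem.List.pyRange_one_eq_nil (by omega)]
    simp only [List.foldl_nil]
    rw [if_neg (by omega)]; ring
  | succ m ih =>
    intro s t hm hs r j
    rw [PySem.List.pyRange_one_cons (by omega), List.foldl_cons]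
    rw [ih (s+1) t (by omega) (by omega)]
    rw [pv_getD_set, List.length_set]
    by_cases hj : s.toNat = j ∧ s.toNat < r.length
    · rw [if_pos hj]
      rw [if_neg (by omega), if_pos (by refine ⟨by omega, by omega, by omega⟩)]
      obtain ⟨h, _⟩ := hj; rw [h]; ring
    · rw [if_neg hj]
      by_cases h1 : s + 1 ≤ (j : Int) ∧ (j : Int) < t ∧ j < r.length
      · rw [if_pos h1, if_pos (by omega)]
      · rw [if_neg h1, if_neg (by omega)]

-- one query step preserves the difference-array invariant
theorem pv_step (n : Int) (hn : 0 < n) (q r d : List Int)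
    (hr : r.length = n.toNat) (hd : d.length = n.toNat + 1)
    (hinv : ∀ j < n.toNat, r.getD j 0 = pvS d (j + 1)) :
    (pvStepA n r q).length = n.toNat ∧ (pvStepB n d q).length = n.toNat + 1 ∧
    ∀ j < n.toNat, (pvStepA n r q).getD j 0 = pvS (pvStepB n d q) (j + 1) := by
  simp only [pvStepA, pvStepB]
  split_ifs with hA hB1 hB2 hB1 hB2
  · exact ⟨hr, hd, hinv⟩
  · exact ⟨hr, hd, hinv⟩
  · exact absurd hB2 (by omega)
  · exact absurd hB1 (by omega)
  · rw [PySem.List.pyRange_one_eq_nil (by omega)]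
    exact ⟨hr, hd, hinv⟩
  · -- the real update: 1 ≤ a ≤ n, 1 ≤ b ≤ n, a < b
    refine ⟨by rw [pv_addRange_length]; exact hr, by simp [hd], ?_⟩
    intro j hj
    rw [pv_addRange_getD (q.getD 2 0) ((q.getD 1 0 - 1) - (q.getD 0 0 - 1)).toNat _ _ rfl (by omega)]
    rw [pvS_set _ _ _ (by rw [List.length_set, hd]; omega)]
    rw [pvS_set _ _ _ (by rw [hd]; omega)]
    rw [pv_getD_set]
    rw [hinv j hj, hr]
    split_ifs <;> omega

-- the invariant over the whole query fold
theorem pv_inv (n : Int) (hn : 0 < n) :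
    ∀ (queries : List (List Int)) (r d : List Int),
    r.length = n.toNat → d.length = n.toNat + 1 →
    (∀ j < n.toNat, r.getD j 0 = pvS d (j + 1)) →
    (queries.foldl (pvStepA n) r).length = n.toNat ∧
    (queries.foldl (pvStepB n) d).length = n.toNat + 1 ∧
    ∀ j < n.toNat, (queries.foldl (pvStepA n) r).getD j 0 = pvS (queries.foldl (pvStepB n) d) (j + 1) := by
  intro queries
  induction queries with
  | nil => intro r d hr hd hinv; exact ⟨hr, hd, hinv⟩
  | cons q qs ih =>
    intro r d hr hd hinv
    obtain ⟨h1, h2, h3⟩ := pv_step n hn q r d hr hd hinv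
    exact ih _ _ h1 h2 h3

-- B's prefix-sum pass builds exactly the partial sums of diff
theorem pv_prefixFold (d : List Int) (m : Nat) :
    (((List.range m).foldl (fun p i => (p.1 ++ [p.2 + d.getD i 0], p.2 + d.getD i 0))
        (([] : List Int), (0 : Int))).1.length = m) ∧
    (((List.range m).foldl (fun p i => (p.1 ++ [p.2 + d.getD i 0], p.2 + d.getD i 0))
        (([] : List Int), (0 : Int))).2 = pvS d m) ∧
    ∀ j < m, (((List.range m).foldl (fun p i => (p.1 ++ [p.2 + d.getD i 0], p.2 + d.getD i 0))
        (([] : List Int), (0 : Int))).1.getD j 0 = pvS d (j + 1)) := by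
  induction m with
  | zero => exact ⟨rfl, rfl, by omega⟩
  | succ m ih =>
    obtain ⟨h1, h2, h3⟩ := ih
    rw [List.range_succ, List.foldl_append]
    simp only [List.foldl_cons, List.foldl_nil]
    refine ⟨by rw [List.length_append, h1]; rfl, by rw [h2, pvS_succ], ?_⟩
    intro j hj
    by_cases hjm : j < m
    · rw [List.getD_append _ _ _ _ (by omega)]
      exact h3 j hjm
    · have hjm' : j = m := by omega
      subst hjm'
      rw [List.getD_append_right _ _ _ _ (by omega), h1, h2, pvS_succ]
      simp

theorem pv_stepA_length (n : Int) (r q : List Int) : (pvStepA n r q).length = r.length := by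
  simp only [pvStepA]
  split_ifs
  · rfl
  · exact pv_addRange_length _ _ _

theorem pv_foldA_length (n : Int) (queries : List (List Int)) (r : List Int) :
    (queries.foldl (pvStepA n) r).length = r.length := by
  induction queries generalizing r with
  | nil => rfl
  | cons q qs ih => rw [List.foldl_cons, ih, pv_stepA_length]

theorem pv_getD_replicate (m i : Nat) : (List.replicate m (0 : Int)).getD i 0 = 0 := by
  simp [List.getD_eq_getElem?_getD, List.getElem?_replicate]
  split <;> rfl

theorem pvS_replicate (m j : Nat) : pvS (List.replicate m (0 : Int)) j = 0 := by
  simp [pvS]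

-- the two ports agree on every input (the Lean ports are total; Pre_ marks where the Pythons return)
theorem pv_main : ∀ (arr_size : Int) (queries : List (List Int)),
    arrayManipulation arr_size queries = arrayManipulation_alt arr_size queries := by
  intro n queries
  simp only [arrayManipulation, arrayManipulation_alt]
  by_cases h0 : n = 0
  · simp [h0]
  rw [if_neg h0, if_neg h0]
  by_cases hq : queries = [] ∨ ((queries.headD []).length : Int) ≠ 3
  · rw [if_pos hq, if_pos hq]
  rw [if_neg hq, if_neg hq]
  by_cases hn : 0 < n
  · -- positive size: invariant + prefix fold
    set d0 : List Int := if n > 0 then List.replicate (n + 1).toNat 0 else [] with hd0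
    have hd0' : d0 = List.replicate (n.toNat + 1) 0 := by
      rw [hd0, if_pos hn]
      congr 1
      omega
    obtain ⟨hL1, hL2, hV⟩ := pv_inv n hn queries (List.replicate n.toNat 0) d0
      (by simp) (by rw [hd0']; simp)
      (by intro j hj; rw [hd0', pv_getD_replicate, pvS_replicate])
    obtain ⟨gL, _, gV⟩ := pv_prefixFold (queries.foldl (pvStepB n) d0) n.toNat
    congr 1
    apply List.ext_getElem (by rw [hL1, gL])
    intro i hi1 hi2
    have hi : i < n.toNat := by rw [hL1] at hi1; exact hi1
    rw [← List.getD_eq_getElem _ 0 hi1, ← List.getD_eq_getElem _ 0 hi2]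
    rw [hV i hi, gV i hi]
  · -- negative size: both sides are some []
    have hnt : n.toNat = 0 := by omega
    rw [hnt]
    simp only [List.replicate_zero, List.range_zero, List.foldl_nil]
    congr 1
    have := pv_foldA_length n queries []
    simp only [List.length_nil] at this
    exact List.eq_nil_of_length_eq_zero this

-- ===== VERDICT (by name: the statement is the Claim_ definition above) =====
theorem arrayManipulation_spec : Claim_equal_arrayManipulation := by
  intro arr_size queries _ _
  exact pv_main arr_size queries
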